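-- pv_equiv track=rewrite | github.com/woletee/1D_ARC | src/backend/generate.py | move_1p
-- ===== SOURCE A (Python) =====
-- def move_1p(arr):
--     new_arr = [0] * len(arr)
--     prev_non_zero = None
--
--     for i in range(len(arr)):
--         if arr[i] != 0:
--             prev_non_zero = arr[i]
--             new_arr[i] = arr[i]
--         elif prev_non_zero is not None:
--             if all(val == 0 for val in arr[i:]):
--                 break
--             new_arr[i] = prev_non_zero
--
--     return new_arr
-- ===== SOURCE B (Python) =====
-- def move_1p(arr):
--     # trim the all-zero tail, then one forward-fill pass over the prefix
--     k = len(arr)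
--     while k > 0 and arr[k - 1] == 0:
--         k -= 1
--     out = []
--     prev = 0
--     for v in arr[:k]:
--         if v != 0:
--             prev = v
--         out.append(prev)
--     out.extend([0] * (len(arr) - k))
--     return out
-- ===== Notes on version B (the rewrite author's own statement) =====
-- stated objective: alternative
-- what changed: Instead of A's forward loop that re-scans the suffix (all(arr[i:])) at each zero to decide when to stop, B first trims the all-zero tail with one backward scan and then does a single unconditional forward-fill pass over the prefix.
import Mathlib
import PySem

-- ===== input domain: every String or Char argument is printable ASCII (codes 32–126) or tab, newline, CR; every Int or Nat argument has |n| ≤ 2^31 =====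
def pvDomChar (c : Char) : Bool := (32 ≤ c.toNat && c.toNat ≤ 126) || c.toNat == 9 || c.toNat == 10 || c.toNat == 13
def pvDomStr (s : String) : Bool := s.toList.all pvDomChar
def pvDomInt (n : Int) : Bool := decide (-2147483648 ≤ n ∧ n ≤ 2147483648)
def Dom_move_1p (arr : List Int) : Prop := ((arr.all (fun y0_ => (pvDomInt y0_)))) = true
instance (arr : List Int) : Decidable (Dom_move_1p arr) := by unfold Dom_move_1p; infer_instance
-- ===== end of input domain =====

-- B replaces A's per-zero suffix re-scan (all(arr[i:])) by one backward trim of the all-zero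
-- tail plus a single forward-fill pass over the prefix; same return value, alternative algorithm.

-- ===== PORT A =====
-- loop of A: i over range(len(arr)); new_arr mutated by index, prev_non_zero : Option Int;
-- `break` = returning newArr. arr[i] with 0 ≤ i < len is exact as getD i 0.
def move_1p_loop (arr : List Int) (i : Nat) (newArr : List Int) (prev : Option Int) : List Int :=
  if i < arr.length then
    let v := arr.getD i 0
    if v ≠ 0 then
      move_1p_loop arr (i + 1) (newArr.set i v) (some v)
    else
      match prev with
      | some p =>
        if (arr.drop i).all (fun x => x == 0) then newArr   -- all(val == 0 for val in arr[i:]) → break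
        else move_1p_loop arr (i + 1) (newArr.set i p) (some p)
      | none => move_1p_loop arr (i + 1) newArr none
  else newArr
termination_by arr.length - i

def move_1p (arr : List Int) : List Int :=
  move_1p_loop arr 0 (List.replicate arr.length 0) none

-- ===== PORT B =====
-- while k > 0 and arr[k-1] == 0: k -= 1   (arr[k-1] with 1 ≤ k ≤ len is exact as getD (k-1) 0)
def pvTrim (arr : List Int) : Nat → Nat
  | 0 => 0
  | k + 1 => if arr.getD k 0 == 0 then pvTrim arr k else k + 1

-- for v in arr[:k]: if v != 0: prev = v; out.append(prev)
def pvFill : List Int → Int → List Int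
  | [], _ => []
  | v :: t, prev =>
    let p := if v ≠ 0 then v else prev
    p :: pvFill t p

def move_1p_alt (arr : List Int) : List Int :=
  let k := pvTrim arr arr.length
  pvFill (arr.take k) 0 ++ List.replicate (arr.length - k) 0   -- arr[:k] with 0 ≤ k ≤ len = take k

-- ===== PRECONDITION & SPEC =====
def Spec_move_1p (arr : List Int) (out : List Int) : Prop := out = move_1p_alt arr
instance (arr : List Int) (out : List Int) : Decidable (Spec_move_1p arr out) := by unfold Spec_move_1p; infer_instance

-- ===== CLAIM (what is proved, stated in full; the proofs are below) =====
def Claim_equal_move_1p : Prop := ∀ (arr : List Int), Dom_move_1p arr → Spec_move_1p arr (move_1p arr)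

-- ===== LEMMAS AND PROOFS =====

-- Reference function both ports are reduced to: forward fill, stopping on an all-zero suffix.
def pvF : List Int → Int → List Int
  | [], _ => []
  | v :: t, prev =>
    if v ≠ 0 then v :: pvF t v
    else if (v :: t).all (fun x => x == 0) then List.replicate (t.length + 1) 0
    else prev :: pvF t prev

theorem pvF_allZero (l : List Int) (prev : Int) (h : l.all (fun x => x == 0) = true) :
    pvF l prev = List.replicate l.length 0 := by
  cases l with
  | nil => simp [pvF]
  | cons v t =>
    have hv : v = 0 := by simpa using List.all_eq_true.mp h v (by simp)
    rw [pvF, if_neg (by simp [hv]), if_pos h]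
    simp

theorem pv_set_append (out rest : List Int) (x : Int) :
    (out ++ rest).set out.length x = out ++ rest.set 0 x := by
  induction out with
  | nil => simp
  | cons a t ih => simp [ih]

theorem pv_lemA : ∀ (l₂ l₁ out : List Int) (pv : Option Int) (prev : Int),
    out.length = l₁.length →
    (pv = none ∧ prev = 0 ∨ pv = some prev) →
    move_1p_loop (l₁ ++ l₂) l₁.length (out ++ List.replicate l₂.length 0) pv
      = out ++ pvF l₂ prev := by
  intro l₂
  induction l₂ with
  | nil =>
    intro l₁ out pv prev hlen hpv
    rw [move_1p_loop.eq_def]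
    simp [pvF]
  | cons v t ih =>
    intro l₁ out pv prev hlen hpv
    have hget : (l₁ ++ v :: t).getD l₁.length 0 = v := by
      simp [List.getD]
    have hdrop : (l₁ ++ v :: t).drop l₁.length = v :: t := by
      simpa using List.drop_left l₁ (v :: t)
    have hset : ∀ x : Int, (out ++ List.replicate (v :: t).length 0).set l₁.length x
        = (out ++ [x]) ++ List.replicate t.length 0 := by
      intro x
      rw [← hlen, pv_set_append]
      simp [List.replicate_succ]
    have harr : l₁ ++ v :: t = (l₁ ++ [v]) ++ t := by simp
    have hlen1 : l₁.length + 1 = (l₁ ++ [v]).length := by simp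
    have hi : l₁.length < (l₁ ++ v :: t).length := by simp
    rw [move_1p_loop.eq_def, if_pos hi]
    simp only [hget, hdrop, hset]
    by_cases hv : v = 0
    · subst hv
      rw [if_neg (by simp)]
      rcases hpv with ⟨hn, hp⟩ | hs
      · subst hn; subst hp
        simp only []
        have heq : out ++ List.replicate ((0:Int) :: t).length 0
            = (out ++ [0]) ++ List.replicate t.length 0 := by
          simp [List.replicate_succ]
        rw [heq, harr, hlen1,
          ih (l₁ ++ [(0:Int)]) (out ++ [0]) none 0 (by simp [hlen]) (Or.inl ⟨rfl, rfl⟩)]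
        by_cases hall : (((0:Int) :: t).all (fun x => x == 0)) = true
        · have hallt : (t.all (fun x => x == 0)) = true := by simpa using hall
          rw [pvF, if_neg (by simp), if_pos hall, pvF_allZero t 0 hallt]
          simp [List.replicate_succ]
        · rw [pvF, if_neg (by simp), if_neg hall]
          simp
      · subst hs
        simp only []
        by_cases hall : (((0:Int) :: t).all (fun x => x == 0)) = true
        · rw [if_pos hall, pvF, if_neg (by simp), if_pos hall]
          simp [List.replicate_succ]
        · rw [if_neg hall, harr, hlen1,
            ih (l₁ ++ [(0:Int)]) (out ++ [prev]) (some prev) prev (by simp [hlen]) (Or.inr rfl)]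
          rw [pvF, if_neg (by simp), if_neg hall]
          simp
    · rw [if_pos hv, harr, hlen1,
        ih (l₁ ++ [v]) (out ++ [v]) (some v) v (by simp [hlen]) (Or.inr rfl)]
      rw [pvF, if_pos hv]
      simp

theorem pv_A (arr : List Int) : move_1p arr = pvF arr 0 := by
  have := pv_lemA arr [] [] none 0 rfl (Or.inl ⟨rfl, rfl⟩)
  simpa [move_1p] using this

theorem pv_trim_le (arr : List Int) : ∀ k, pvTrim arr k ≤ k := by
  intro k
  induction k with
  | zero => simp [pvTrim]
  | succ k ih => simp only [pvTrim]; split <;> omega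

theorem pv_trim_drop (arr : List Int) : ∀ k,
    (arr.drop k).all (fun x => x == 0) = true →
    (arr.drop (pvTrim arr k)).all (fun x => x == 0) = true := by
  intro k
  induction k with
  | zero => intro h; rw [pvTrim]; exact h
  | succ k ih =>
    intro h
    simp only [pvTrim]
    split
    · rename_i h0
      apply ih
      by_cases hk : k < arr.length
      · rw [List.drop_eq_getElem_cons hk]
        have hz : arr[k] = 0 := by
          simpa [List.getD, List.getElem?_eq_getElem hk] using h0
        simp [hz, h]
      · rw [List.drop_eq_nil_of_le (by omega)]
        simp
    · exact h

theorem pv_trim_last (arr : List Int) : ∀ k,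
    pvTrim arr k = 0 ∨ ¬ (arr.getD (pvTrim arr k - 1) 0 = 0) := by
  intro k
  induction k with
  | zero => exact Or.inl rfl
  | succ k ih =>
    simp only [pvTrim]
    split
    · exact ih
    · rename_i hne
      right
      simpa [List.getD] using hne

theorem pv_fillF : ∀ (l₁ l₂ : List Int) (prev : Int),
    l₂.all (fun x => x == 0) = true →
    (∀ x, l₁.getLast? = some x → x ≠ 0) →
    pvF (l₁ ++ l₂) prev = pvFill l₁ prev ++ List.replicate l₂.length 0 := by
  intro l₁
  induction l₁ with
  | nil => intro l₂ prev h _; simp [pvFill, pvF_allZero l₂ prev h]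
  | cons v t ih =>
    intro l₂ prev h hlast
    have hlast' : ∀ x, t.getLast? = some x → x ≠ 0 := by
      intro x hx
      cases t with
      | nil => simp at hx
      | cons b u => exact hlast x (by rw [List.getLast?_cons_cons]; exact hx)
    by_cases hv : v = 0
    · subst hv
      have ht : t ≠ [] := by
        intro he; subst he
        exact (hlast 0 rfl) rfl
      obtain ⟨x, hx⟩ := Option.isSome_iff_exists.mp (List.getLast?_isSome.mpr ht)
      have hx0 : x ≠ 0 := hlast' x hx
      have hmem : x ∈ t := List.mem_of_getLast? hx
      have hnall : ¬ (((0:Int) :: (t ++ l₂)).all (fun y => y == 0)) = true := by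
        intro hall
        have := List.all_eq_true.mp hall x (by simp [hmem])
        simp [hx0] at this
      show pvF ((0:Int) :: (t ++ l₂)) prev = _
      rw [pvF, if_neg (by simp), if_neg hnall, ih l₂ prev h hlast']
      simp [pvFill]
    · show pvF (v :: (t ++ l₂)) prev = _
      rw [pvF, if_pos hv, ih l₂ v h hlast']
      simp [pvFill, hv]

theorem pv_B (arr : List Int) : move_1p_alt arr = pvF arr 0 := by
  unfold move_1p_alt
  have hkle : pvTrim arr arr.length ≤ arr.length := pv_trim_le arr arr.length
  set k := pvTrim arr arr.length with hk
  have hdropall : (arr.drop k).all (fun x => x == 0) = true := by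
    apply pv_trim_drop
    simp [List.drop_eq_nil_of_le]
  have hlast : ∀ x, (arr.take k).getLast? = some x → x ≠ 0 := by
    intro x hx h0
    have hk0 : k ≠ 0 := by
      intro he; rw [he] at hx; simp at hx
    rcases pv_trim_last arr arr.length with h | h
    · rw [← hk] at h; exact hk0 h
    · rw [← hk] at h
      have hklt : k - 1 < arr.length := by omega
      have hgl : (arr.take k).getLast? = some (arr[k-1]) := by
        rw [List.getLast?_eq_getElem?]
        simp only [List.length_take, Nat.min_eq_left hkle]
        rw [List.getElem?_take_of_lt (by omega), List.getElem?_eq_getElem hklt]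
      rw [hgl] at hx
      apply h
      simp only [List.getD, List.getElem?_eq_getElem hklt]
      rw [show arr[k-1] = x from by injection hx, h0]
      rfl
  have hmain := pv_fillF (arr.take k) (arr.drop k) 0 hdropall hlast
  rw [List.take_append_drop] at hmain
  rw [hmain]
  simp

-- ===== VERDICT (by name: the statement is the Claim_ definition above) =====
theorem move_1p_spec : Claim_equal_move_1p := by
  intro arr _
  unfold Spec_move_1p
  rw [pv_A, pv_B]
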